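-- pv_equiv track=rewrite | github.com/tdw419/geometry_os | systems/geos/core.py | hilbert_xy2d
-- ===== SOURCE A (Python) =====
-- def hilbert_xy2d(n: int, x: int, y: int) -> int:
--     """
--     Convert (x, y) coordinates to Hilbert index.
--
--     Args:
--         n: Grid size (must be power of 2)
--         x: X coordinate (0 to n-1)
--         y: Y coordinate (0 to n-1)
--
--     Returns:
--         Hilbert index (0 to n*n-1)
--     """
--     d = 0
--     s = n // 2
--     while s > 0:
--         rx = 1 if (x & s) > 0 else 0
--         ry = 1 if (y & s) > 0 else 0
--         d += s * s * ((3 * rx) ^ ry)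
--         if ry == 0:
--             if rx == 1:
--                 x = s - 1 - x
--                 y = s - 1 - y
--             x, y = y, x
--         s //= 2
--     return d
-- ===== SOURCE B (Python) =====
-- def _hilbert_masks(n):
--     """Mask sequence n//2, n//4, ... down to (but excluding) 0."""
--     masks = []
--     s = n // 2
--     while s > 0:
--         masks.append(s)
--         s //= 2
--     return masks
--
--
-- def _hilbert_go(masks, x, y):
--     """Sum the contribution of the first mask and recurse on the rest."""
--     if not masks:
--         return 0
--     s = masks[0]
--     rx = 1 if (x & s) > 0 else 0
--     ry = 1 if (y & s) > 0 else 0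
--     if ry == 0:
--         if rx == 1:
--             x = s - 1 - x
--             y = s - 1 - y
--         x, y = y, x
--     return s * s * ((3 * rx) ^ ry) + _hilbert_go(masks[1:], x, y)
--
--
-- def hilbert_xy2d(n: int, x: int, y: int) -> int:
--     return _hilbert_go(_hilbert_masks(n), x, y)
-- ===== Notes on version B (the rewrite author's own statement) =====
-- stated objective: alternative
-- what changed: Replaced the single while loop with mutable accumulator by a two-phase decomposition: first materialise the mask sequence n//2, n//4, ..., then a non-accumulator structural recursion over that list that returns each level's contribution plus the recursive remainder.
import Mathlib
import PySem

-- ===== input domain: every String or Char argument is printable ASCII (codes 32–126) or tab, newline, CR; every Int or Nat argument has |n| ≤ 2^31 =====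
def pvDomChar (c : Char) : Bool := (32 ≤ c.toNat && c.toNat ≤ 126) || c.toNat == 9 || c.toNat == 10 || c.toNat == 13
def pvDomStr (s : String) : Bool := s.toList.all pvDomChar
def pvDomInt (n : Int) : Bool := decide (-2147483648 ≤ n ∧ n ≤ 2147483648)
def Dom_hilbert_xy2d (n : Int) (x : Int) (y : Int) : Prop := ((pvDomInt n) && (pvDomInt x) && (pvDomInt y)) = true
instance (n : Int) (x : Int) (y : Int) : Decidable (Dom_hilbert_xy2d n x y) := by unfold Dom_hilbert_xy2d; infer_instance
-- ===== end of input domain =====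

-- B replaces A's single while loop with a two-phase decomposition (mask list, then a
-- non-accumulator structural recursion); same cost, alternative structure.

-- ===== PORT A =====
-- the while loop of A, state (x, y, d), control variable s
def hilbertA_loop (s : Int) (x : Int) (y : Int) (d : Int) : Int :=
  if h : 0 < s then
    let rx : Int := if 0 < PySem.Int.band x s then 1 else 0
    let ry : Int := if 0 < PySem.Int.band y s then 1 else 0
    let d' : Int := d + s * s * PySem.Int.bxor (3 * rx) ry
    let p : Int × Int :=
      if ry = 0 then
        if rx = 1 then (s - 1 - y, s - 1 - x) else (y, x)
      else (x, y)
    hilbertA_loop (PySem.Int.floordiv s 2) p.1 p.2 d'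
  else d
termination_by s.toNat
decreasing_by
  have h2 : PySem.Int.floordiv s 2 = s / 2 := PySem.Int.floordiv_eq_ediv_of_pos (by omega)
  rw [h2]; omega

def hilbert_xy2d (n : Int) (x : Int) (y : Int) : Int :=
  hilbertA_loop (PySem.Int.floordiv n 2) x y 0

-- ===== PORT B =====
-- phase 1: the mask sequence n//2, n//4, ... down to (but excluding) 0
def hilbertB_masks (s : Int) : List Int :=
  if _h : 0 < s then s :: hilbertB_masks (PySem.Int.floordiv s 2) else []
termination_by s.toNat
decreasing_by
  have h2 : PySem.Int.floordiv s 2 = s / 2 := PySem.Int.floordiv_eq_ediv_of_pos (by omega)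
  rw [h2]; omega

-- phase 2: contribution of the head mask plus the recursive remainder
def hilbertB_go : List Int → Int → Int → Int
  | [], _, _ => 0
  | s :: rest, x, y =>
    let rx : Int := if 0 < PySem.Int.band x s then 1 else 0
    let ry : Int := if 0 < PySem.Int.band y s then 1 else 0
    let p : Int × Int :=
      if ry = 0 then
        if rx = 1 then (s - 1 - y, s - 1 - x) else (y, x)
      else (x, y)
    s * s * PySem.Int.bxor (3 * rx) ry + hilbertB_go rest p.1 p.2

def hilbert_xy2d_alt (n : Int) (x : Int) (y : Int) : Int :=
  hilbertB_go (hilbertB_masks (PySem.Int.floordiv n 2)) x y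

-- ===== PRECONDITION & SPEC =====
def Spec_hilbert_xy2d (n : Int) (x : Int) (y : Int) (out : Int) : Prop := out = hilbert_xy2d_alt n x y
instance (n : Int) (x : Int) (y : Int) (out : Int) : Decidable (Spec_hilbert_xy2d n x y out) := by unfold Spec_hilbert_xy2d; infer_instance

-- ===== CLAIM (what is proved, stated in full; the proofs are below) =====
def Claim_equal_hilbert_xy2d : Prop := ∀ (n : Int) (x : Int) (y : Int), Dom_hilbert_xy2d n x y → Spec_hilbert_xy2d n x y (hilbert_xy2d n x y)

-- ===== LEMMAS AND PROOFS =====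
theorem hilbertA_loop_eq_go (s x y d : Int) :
    hilbertA_loop s x y d = d + hilbertB_go (hilbertB_masks s) x y := by
  fun_induction hilbertA_loop s x y d with
  | case1 s x y d h rx ry d' p ih =>
    rw [hilbertB_masks, dif_pos h, hilbertB_go, ih]
    simp only [d', rx, ry, p, dite_eq_ite]
    ring
  | case2 s x y d h =>
    rw [hilbertB_masks, dif_neg h, hilbertB_go]; ring

-- ===== VERDICT (by name: the statement is the Claim_ definition above) =====
theorem hilbert_xy2d_spec : Claim_equal_hilbert_xy2d := by
  intro n x y _
  unfold Spec_hilbert_xy2d hilbert_xy2d hilbert_xy2d_alt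
  rw [hilbertA_loop_eq_go]; ring
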